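-- pv_equiv track=rewrite | github.com/mattklepp/k4 | vigenere_key_analyzer.py | identify_landmarks
-- ===== SOURCE A (Python) =====
-- from typing import Dict, List, Tuple, Optional
--
-- def identify_landmarks(text: str) -> List[str]:
--     """Identify potential landmark names in decrypted text"""
--     landmarks = []
--
--     # Berlin landmarks and locations
--     berlin_landmarks = [
--         'BRANDENBURGER', 'BRANDENBURG', 'POTSDAMER', 'ALEXANDERPLATZ',
--         'TIERGARTEN', 'REICHSTAG', 'BUNDESTAG', 'CHARLOTTENBURG',
--         'KREUZBERG', 'MITTE', 'PRENZLAUER', 'FRIEDRICHSHAIN',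
--         'UNTER', 'LINDEN', 'KURFURSTENDAMM', 'HACKESCHER',
--         'FERNSEHTURM', 'SIEGESSAULE', 'KAISER', 'WILHELM',
--         'GEDACHTNISKIRCHE', 'CHECKPOINT', 'CHARLIE', 'EAST', 'WEST',
--         'MUSEUM', 'ISLAND', 'CATHEDRAL', 'DOM', 'TOWER', 'TURM',
--         'CLOCK', 'UHR', 'MENGENLEHREUHR', 'EUROPA', 'CENTER'
--     ]
--
--     # Check for landmark matches
--     for landmark in berlin_landmarks:
--         if landmark in text:
--             landmarks.append(landmark)
--
--         # Check for partial matches (at least 4 characters)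
--         for i in range(len(text) - 3):
--             for length in range(4, min(len(landmark) + 1, len(text) - i + 1)):
--                 if text[i:i+length] == landmark[:length]:
--                     landmarks.append(f"{landmark} (partial: {text[i:i+length]})")
--
--     return list(set(landmarks))
-- ===== SOURCE B (Python) =====
-- def _longest_prefix_len(lm, text):
--     """Length of the longest prefix of lm occurring in text (0 if none)."""
--     m = len(lm)
--     while m > 0 and lm[:m] not in text:
--         m -= 1
--     return m
--
--
-- def identify_landmarks(text):
--     """Identify potential landmark names in decrypted text"""
--     berlin_landmarks = [
--         'BRANDENBURGER', 'BRANDENBURG', 'POTSDAMER', 'ALEXANDERPLATZ',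
--         'TIERGARTEN', 'REICHSTAG', 'BUNDESTAG', 'CHARLOTTENBURG',
--         'KREUZBERG', 'MITTE', 'PRENZLAUER', 'FRIEDRICHSHAIN',
--         'UNTER', 'LINDEN', 'KURFURSTENDAMM', 'HACKESCHER',
--         'FERNSEHTURM', 'SIEGESSAULE', 'KAISER', 'WILHELM',
--         'GEDACHTNISKIRCHE', 'CHECKPOINT', 'CHARLIE', 'EAST', 'WEST',
--         'MUSEUM', 'ISLAND', 'CATHEDRAL', 'DOM', 'TOWER', 'TURM',
--         'CLOCK', 'UHR', 'MENGENLEHREUHR', 'EUROPA', 'CENTER'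
--     ]
--
--     # Prefix occurrence is downward-closed (if lm[:L] occurs, so does every
--     # shorter prefix), so the set of matching lengths is exactly 1..m where m
--     # is the longest matching prefix length; dedup collapses all positions.
--     def seg(lm):
--         m = _longest_prefix_len(lm, text)
--         names = [lm] if m == len(lm) else []
--         return names + [f"{lm} (partial: {lm[:L]})" for L in range(4, m + 1)]
--
--     return list(set(s for lm in berlin_landmarks for s in seg(lm)))
-- ===== Notes on version B (the rewrite author's own statement) =====
-- stated objective: faster
-- what changed: Instead of A's triple-nested position/length/slice scan, B computes for each landmark the longest prefix occurring in the text (one downward scan of substring tests) and then emits the bare name and all partials for prefix lengths 4..m directly; prefix occurrence is downward-closed and the final list(set(...)) dedup collapses positions, so the results coincide.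
import Mathlib
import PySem

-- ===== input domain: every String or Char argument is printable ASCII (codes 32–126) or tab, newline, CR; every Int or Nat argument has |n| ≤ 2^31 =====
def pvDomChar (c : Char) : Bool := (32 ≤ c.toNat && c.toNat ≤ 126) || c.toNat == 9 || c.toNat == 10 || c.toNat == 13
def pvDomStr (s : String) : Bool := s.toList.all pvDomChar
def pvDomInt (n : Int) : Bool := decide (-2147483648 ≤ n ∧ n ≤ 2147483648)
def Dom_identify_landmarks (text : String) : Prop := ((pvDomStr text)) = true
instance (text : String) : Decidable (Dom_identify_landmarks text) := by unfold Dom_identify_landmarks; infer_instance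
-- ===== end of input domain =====

-- B replaces A's position/length/slice triple scan: it computes, per landmark, the longest
-- prefix length occurring in the text and emits the bare name and the partials for lengths
-- 4..m directly; after the final dedup both return the same list (return value only).

-- ===== PORT A =====
def pvLandmarkList : List String := [
  "BRANDENBURGER", "BRANDENBURG", "POTSDAMER", "ALEXANDERPLATZ",
  "TIERGARTEN", "REICHSTAG", "BUNDESTAG", "CHARLOTTENBURG",
  "KREUZBERG", "MITTE", "PRENZLAUER", "FRIEDRICHSHAIN",
  "UNTER", "LINDEN", "KURFURSTENDAMM", "HACKESCHER",
  "FERNSEHTURM", "SIEGESSAULE", "KAISER", "WILHELM",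
  "GEDACHTNISKIRCHE", "CHECKPOINT", "CHARLIE", "EAST", "WEST",
  "MUSEUM", "ISLAND", "CATHEDRAL", "DOM", "TOWER", "TURM",
  "CLOCK", "UHR", "MENGENLEHREUHR", "EUROPA", "CENTER"]

def pvTag : List Char := " (partial: ".toList

def identify_landmarks (text : String) : List String :=
  let t := text.toList
  let landmarks : List String := pvLandmarkList.foldl (fun landmarks lm =>
    let l := lm.toList
    let landmarks := if PySem.Chars.isIn l t then landmarks ++ [lm] else landmarks
    (PySem.List.pyRange 0 ((t.length : Int) - 3) 1).foldl (fun landmarks i =>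
      (PySem.List.pyRange 4 (min ((l.length : Int) + 1) ((t.length : Int) - i + 1)) 1).foldl
        (fun landmarks length =>
          if PySem.List.slice t (some i) (some (i + length)) = PySem.List.slice l (some 0) (some length)
          then landmarks ++ [String.ofList (l ++ pvTag ++ PySem.List.slice t (some i) (some (i + length)) ++ [')'])]
          else landmarks) landmarks) landmarks) []
  PySem.List.dedup landmarks

-- ===== PORT B =====
-- while m > 0 and lm[:m] not in text: m -= 1   (downward scan from len(lm))
def pvLongestPrefixLen (l t : List Char) : Nat → Nat
  | 0 => 0
  | Nat.succ m => if PySem.Chars.isIn (l.take (m + 1)) t then m + 1 else pvLongestPrefixLen l t m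

def pvSegB (t : List Char) (lm : String) : List String :=
  let l := lm.toList
  let m := pvLongestPrefixLen l t l.length
  (if m = l.length then [lm] else [])
    ++ (PySem.List.pyRange 4 ((m : Int) + 1) 1).map
        (fun L => String.ofList (l ++ pvTag ++ PySem.List.slice l (some 0) (some L) ++ [')']))

def identify_landmarks_alt (text : String) : List String :=
  PySem.List.dedup (pvLandmarkList.flatMap (pvSegB text.toList))

-- ===== PRECONDITION & SPEC =====
def Spec_identify_landmarks (text : String) (out : List String) : Prop := out = identify_landmarks_alt text
instance (text : String) (out : List String) : Decidable (Spec_identify_landmarks text out) := by unfold Spec_identify_landmarks; infer_instance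

-- ===== CLAIM (what is proved, stated in full; the proofs are below) =====
def Claim_equal_identify_landmarks : Prop := ∀ (text : String), Dom_identify_landmarks text → Spec_identify_landmarks text (identify_landmarks text)

-- ===== LEMMAS AND PROOFS =====

theorem pv_foldl_add_eq {α : Type} [BEq α] [LawfulBEq α] (xs : List α) (s : List α) :
    List.foldl PySem.Set.add s xs = s ++ (PySem.List.dedup xs).filter (fun y => !s.contains y) := by
  induction xs generalizing s with
  | nil => simp [PySem.List.dedup_eq_ofList, PySem.Set.ofList_eq_foldl]
  | cons x xs ih =>
      have hcons : PySem.List.dedup (x :: xs)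
          = [x] ++ (PySem.List.dedup xs).filter (fun y => !([x] : List α).contains y) := by
        rw [PySem.List.dedup_eq_ofList, PySem.Set.ofList_eq_foldl]
        show List.foldl PySem.Set.add (PySem.Set.add [] x) xs = _
        rw [ih]
        simp [PySem.Set.add, PySem.List.dedup_eq_ofList]
      rw [List.foldl_cons, ih, hcons]
      by_cases h : s.contains x
      · have h' : x ∈ s := by simpa using h
        have hadd : PySem.Set.add s x = s := by simp [PySem.Set.add, h']
        rw [hadd]
        simp only [List.cons_append, List.nil_append, List.filter_cons, h, Bool.not_true,
          List.filter_filter]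
        simp only [List.append_cancel_left_eq]
        apply List.filter_congr
        intro y _
        by_cases hy : y = x
        · subst hy; simp [h']
        · simp [hy]
      · have h' : x ∉ s := by simpa using h
        have hadd : PySem.Set.add s x = s ++ [x] := by simp [PySem.Set.add, h']
        rw [hadd]
        simp only [List.cons_append, List.nil_append, List.filter_cons, h, Bool.not_false,
          List.filter_filter, List.append_assoc,
          List.append_cancel_left_eq]
        congr 1
        apply List.filter_congr
        intro y _
        by_cases hy : y = x
        · subst hy; simp [h']
        · simp [hy]

theorem pv_dedup_append {α : Type} [BEq α] [LawfulBEq α] (xs ys : List α) :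
    PySem.List.dedup (xs ++ ys)
      = PySem.List.dedup xs ++ (PySem.List.dedup ys).filter (fun y => !(PySem.List.dedup xs).contains y) := by
  rw [PySem.List.dedup_eq_ofList, PySem.Set.ofList_eq_foldl, List.foldl_append, pv_foldl_add_eq]
  simp [PySem.List.dedup_eq_ofList, PySem.Set.ofList_eq_foldl]

theorem pv_dedup_cons {α : Type} [BEq α] [LawfulBEq α] (x : α) (xs : List α) :
    PySem.List.dedup (x :: xs) = x :: (PySem.List.dedup xs).filter (fun y => !([x] : List α).contains y) := by
  have : (x :: xs) = [x] ++ xs := rfl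
  rw [this, pv_dedup_append]
  rfl

theorem pv_dedup_eq_self_of_nodup {α : Type} [BEq α] [LawfulBEq α] {xs : List α} (h : xs.Nodup) :
    PySem.List.dedup xs = xs := by
  induction xs with
  | nil => rfl
  | cons x xs ih =>
      rw [pv_dedup_cons, ih h.of_cons]
      have hx : x ∉ xs := (List.nodup_cons.mp h).1
      congr 1
      rw [List.filter_eq_self]
      intro y hy
      have : y ≠ x := fun e => hx (e ▸ hy)
      simp [this]

theorem pv_dedup_map_injOn {α β : Type} [BEq α] [BEq β] [LawfulBEq α] [LawfulBEq β]
    (f : β → α) (l : List β) (h : ∀ x ∈ l, ∀ y ∈ l, f x = f y → x = y) :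
    PySem.List.dedup (l.map f) = (PySem.List.dedup l).map f := by
  induction l with
  | nil => rfl
  | cons x xs ih =>
      rw [List.map_cons, pv_dedup_cons, pv_dedup_cons, List.map_cons,
        ih (fun a ha b hb => h a (by simp [ha]) b (by simp [hb])), List.filter_map]
      congr 1
      congr 1
      apply List.filter_congr
      intro a ha
      have ha' : a ∈ xs := (PySem.List.mem_dedup xs a).mp ha
      have hiff : f a = f x ↔ a = x :=
        ⟨fun e => h a (by simp [ha']) x (by simp) e, fun e => e ▸ rfl⟩
      by_cases e : a = x
      · simp [Function.comp, e]
      · have e2 : f a ≠ f x := fun h' => e (hiff.mp h')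
        simp [Function.comp, e, e2]

theorem pv_dedup_append_congr {α : Type} [BEq α] [LawfulBEq α] {a a' b b' : List α}
    (ha : PySem.List.dedup a = PySem.List.dedup a') (hb : PySem.List.dedup b = PySem.List.dedup b') :
    PySem.List.dedup (a ++ b) = PySem.List.dedup (a' ++ b') := by
  rw [pv_dedup_append, pv_dedup_append, ha, hb]

theorem pv_dedup_flatMap_congr {α β : Type} [BEq α] [LawfulBEq α] (f g : β → List α) (l : List β)
    (h : ∀ x ∈ l, PySem.List.dedup (f x) = PySem.List.dedup (g x)) :
    PySem.List.dedup (l.flatMap f) = PySem.List.dedup (l.flatMap g) := by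
  induction l with
  | nil => rfl
  | cons x xs ih =>
      simp only [List.flatMap_cons]
      exact pv_dedup_append_congr (h x (by simp)) (ih (fun y hy => h y (by simp [hy])))

def PvGood (xs : List Int) : Prop :=
  List.Pairwise (· < ·) xs ∧ (∀ x ∈ xs, 4 ≤ x) ∧ (∀ x ∈ xs, ∀ y : Int, 4 ≤ y → y ≤ x → y ∈ xs)

theorem pv_good_nodup {xs : List Int} (h : PvGood xs) : xs.Nodup :=
  h.1.imp (fun hlt => ne_of_lt hlt)

theorem pv_good_filter (p : Int → Bool) (b : Int)
    (hdc : ∀ x y : Int, 4 ≤ y → y ≤ x → p x = true → p y = true) :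
    PvGood ((PySem.List.pyRange 4 b 1).filter p) := by
  refine ⟨List.Pairwise.filter p (PySem.List.pairwise_lt_pyRange_one 4 b), ?_, ?_⟩
  · intro x hx
    exact (PySem.List.mem_pyRange_one.mp (List.mem_filter.mp hx).1).1
  · intro x hx y h4 hyx
    have hx' := List.mem_filter.mp hx
    have hb := (PySem.List.mem_pyRange_one.mp hx'.1).2
    exact List.mem_filter.mpr ⟨PySem.List.mem_pyRange_one.mpr ⟨h4, lt_of_le_of_lt hyx hb⟩,
      hdc x y h4 hyx hx'.2⟩

theorem pv_good_pyRange (b : Int) : PvGood (PySem.List.pyRange 4 b 1) := by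
  refine ⟨PySem.List.pairwise_lt_pyRange_one 4 b, ?_, ?_⟩
  · intro x hx
    exact (PySem.List.mem_pyRange_one.mp hx).1
  · intro x hx y h4 hyx
    have := PySem.List.mem_pyRange_one.mp hx
    exact PySem.List.mem_pyRange_one.mpr ⟨h4, lt_of_le_of_lt hyx this.2⟩

theorem pv_good_append {a b : List Int} (ha : PvGood a) (hb : PvGood b) :
    PvGood (a ++ b.filter (fun y => !a.contains y)) := by
  have cross : ∀ x ∈ a, ∀ y ∈ b.filter (fun y => !a.contains y), x < y := by
    intro x hx y hy
    have hy' := List.mem_filter.mp hy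
    have hyb : y ∈ b := hy'.1
    have hyna : y ∉ a := by simpa using hy'.2
    by_contra hlt
    push Not at hlt
    exact hyna (ha.2.2 x hx y (hb.2.1 y hyb) hlt)
  refine ⟨List.pairwise_append.mpr ⟨ha.1, List.Pairwise.filter _ hb.1, cross⟩, ?_, ?_⟩
  · intro x hx
    rcases List.mem_append.mp hx with h | h
    · exact ha.2.1 x h
    · exact hb.2.1 x (List.mem_filter.mp h).1
  · intro x hx y h4 hyx
    rcases List.mem_append.mp hx with h | h
    · exact List.mem_append.mpr (Or.inl (ha.2.2 x h y h4 hyx))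
    · have hxb : x ∈ b := (List.mem_filter.mp h).1
      have hyb : y ∈ b := hb.2.2 x hxb y h4 hyx
      by_cases hya : y ∈ a
      · exact List.mem_append.mpr (Or.inl hya)
      · exact List.mem_append.mpr (Or.inr (List.mem_filter.mpr ⟨hyb, by simpa using hya⟩))

theorem pv_dedup_flatMap_good {β : Type} (f : β → List Int) (l : List β)
    (h : ∀ x ∈ l, PvGood (f x)) : PvGood (PySem.List.dedup (l.flatMap f)) := by
  induction l with
  | nil => exact ⟨List.Pairwise.nil, by simp [PySem.List.dedup], by simp [PySem.List.dedup]⟩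
  | cons x xs ih =>
      rw [List.flatMap_cons, pv_dedup_append,
        pv_dedup_eq_self_of_nodup (pv_good_nodup (h x (by simp)))]
      exact pv_good_append (h x (by simp)) (ih (fun y hy => h y (by simp [hy])))

theorem pv_good_eq_of_mem_iff {xs ys : List Int} (hx : PvGood xs) (hy : PvGood ys)
    (h : ∀ z, z ∈ xs ↔ z ∈ ys) : xs = ys := by
  have hperm : xs.Perm ys := (List.perm_ext_iff_of_nodup (pv_good_nodup hx) (pv_good_nodup hy)).mpr h
  have h1 := PySem.List.sorted_eq_of_perm_of_pairwise_lt ys xs (fun z => z) hperm hx.1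
  have h2 := PySem.List.sorted_eq_of_perm_of_pairwise_lt ys ys (fun z => z) (List.Perm.refl ys) hy.1
  exact h1.symm.trans h2

theorem pv_slice_zero (l : List Char) (z : Int) (hz : 0 ≤ z) :
    PySem.List.slice l (some 0) (some z) = l.take z.toNat := by
  rw [PySem.List.slice_toNat l (le_refl 0) hz]; simp

theorem pv_slice_ii (t : List Char) (i z : Int) (hi : 0 ≤ i) (hz : 0 ≤ z) :
    PySem.List.slice t (some i) (some (i + z)) = (t.drop i.toNat).take z.toNat := by
  rw [PySem.List.slice_toNat t hi (by omega)]; congr 1; omega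

-- prefix occurrence is downward-closed
theorem pv_take_mono (l t : List Char) (a b : Nat) (hab : a ≤ b)
    (h : PySem.Chars.isIn (l.take b) t = true) : PySem.Chars.isIn (l.take a) t = true := by
  rw [PySem.Chars.isIn_iff_infix] at h ⊢
  have hm : l.take a = (l.take b).take a := by rw [List.take_take, min_eq_left hab]
  rw [hm]
  exact (List.take_prefix _ _).isInfix.trans h

theorem pv_lpl_le (l t : List Char) (n : Nat) : pvLongestPrefixLen l t n ≤ n := by
  induction n with
  | zero => simp [pvLongestPrefixLen]
  | succ m ih =>
      unfold pvLongestPrefixLen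
      split
      · exact le_refl _
      · exact le_trans ih (Nat.le_succ m)

theorem pv_lpl_pos_isIn (l t : List Char) (n : Nat) (h : 0 < pvLongestPrefixLen l t n) :
    PySem.Chars.isIn (l.take (pvLongestPrefixLen l t n)) t = true := by
  induction n with
  | zero => simp [pvLongestPrefixLen] at h
  | succ m ih =>
      unfold pvLongestPrefixLen at h ⊢
      split
      · next hp => exact hp
      · next hp => exact ih (by simpa [pvLongestPrefixLen, hp] using h)

theorem pv_lpl_ge (l t : List Char) (n L : Nat) (hL : L ≤ n)
    (h : PySem.Chars.isIn (l.take L) t = true) : L ≤ pvLongestPrefixLen l t n := by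
  induction n with
  | zero => omega
  | succ m ih =>
      unfold pvLongestPrefixLen
      split
      · omega
      · next hp =>
        apply ih
        rcases Nat.lt_or_ge L (m + 1) with hlt | hge
        · omega
        · exfalso
          have : L = m + 1 := by omega
          rw [this] at h
          exact hp h

theorem pv_lpl_iff (l t : List Char) (L : Nat) (h1 : 1 ≤ L) (hn : L ≤ l.length) :
    PySem.Chars.isIn (l.take L) t = true ↔ L ≤ pvLongestPrefixLen l t l.length := by
  constructor
  · exact pv_lpl_ge l t l.length L hn
  · intro hLe
    exact pv_take_mono l t L _ hLe (pv_lpl_pos_isIn l t l.length (by omega))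

theorem pv_lpl_full_iff (l t : List Char) :
    PySem.Chars.isIn l t = true ↔ pvLongestPrefixLen l t l.length = l.length := by
  rcases Nat.eq_zero_or_pos l.length with h0 | hpos
  · have : l = [] := List.length_eq_zero_iff.mp h0
    subst this
    simp [pvLongestPrefixLen, PySem.Chars.isIn_nil]
  · have htake : l.take l.length = l := List.take_length
    constructor
    · intro h
      have := pv_lpl_ge l t l.length l.length (le_refl _) (by rwa [htake])
      have h2 := pv_lpl_le l t l.length
      omega
    · intro h
      have := pv_lpl_pos_isIn l t l.length (by omega)
      rwa [h, htake] at this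

def pvLenA (t l : List Char) : List Int :=
  (PySem.List.pyRange 0 ((t.length : Int) - 3) 1).flatMap (fun i =>
    (PySem.List.pyRange 4 (min ((l.length : Int) + 1) ((t.length : Int) - i + 1)) 1).filter
      (fun len => decide (PySem.List.slice t (some i) (some (i + len)) = PySem.List.slice l (some 0) (some len))))

def pvLenB (t l : List Char) : List Int :=
  PySem.List.pyRange 4 ((pvLongestPrefixLen l t l.length : Int) + 1) 1

theorem pv_mem_lenA_iff_lenB (t l : List Char) (z : Int) : z ∈ pvLenA t l ↔ z ∈ pvLenB t l := by
  unfold pvLenA pvLenB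
  simp only [List.mem_flatMap, List.mem_filter, PySem.List.mem_pyRange_one, decide_eq_true_eq]
  constructor
  · rintro ⟨i, ⟨hi0, _⟩, ⟨⟨h4, hlt⟩, heq⟩⟩
    have hz : (0:Int) ≤ z := by omega
    refine ⟨h4, ?_⟩
    have hisin : PySem.Chars.isIn (l.take z.toNat) t = true := by
      rw [← PySem.Chars.exists_prefix_drop_iff_isIn]
      refine ⟨i.toNat, ?_⟩
      rw [← pv_slice_zero l z hz, ← heq, pv_slice_ii t i z hi0 hz]
      exact List.take_prefix _ _
    have hzl : z.toNat ≤ l.length := by omega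
    have := pv_lpl_ge l t l.length z.toNat hzl hisin
    omega
  · rintro ⟨h4, hzm⟩
    have hz : (0:Int) ≤ z := by omega
    have hm := pv_lpl_le l t l.length
    have hzl : z.toNat ≤ l.length := by omega
    have hisin : PySem.Chars.isIn (l.take z.toNat) t = true :=
      (pv_lpl_iff l t z.toNat (by omega) hzl).mpr (by omega)
    obtain ⟨j, hpre⟩ := (PySem.Chars.exists_prefix_drop_iff_isIn _ _).mpr hisin
    have hlen : (l.take z.toNat).length = z.toNat := by
      rw [List.length_take]; omega
    have hle := hpre.length_le
    rw [hlen, List.length_drop] at hle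
    have hjt : j + z.toNat ≤ t.length := by omega
    refine ⟨(j : Int), ⟨by positivity, by omega⟩, ⟨⟨h4, lt_min (by omega) (by omega)⟩, ?_⟩⟩
    rw [pv_slice_ii t j z (by positivity) hz, pv_slice_zero l z hz]
    have := List.prefix_iff_eq_take.mp hpre
    rw [hlen] at this
    simpa using this.symm

theorem pv_good_lenB (t l : List Char) : PvGood (pvLenB t l) := pv_good_pyRange _

theorem pv_good_lenA (t l : List Char) : PvGood (PySem.List.dedup (pvLenA t l)) := by
  unfold pvLenA
  apply pv_dedup_flatMap_good
  intro i hi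
  have hi0 : (0:Int) ≤ i := (PySem.List.mem_pyRange_one.mp hi).1
  apply pv_good_filter
  intro x y h4 hyx hp
  simp only [decide_eq_true_eq] at hp ⊢
  rw [pv_slice_ii t i x hi0 (by omega), pv_slice_zero l x (by omega)] at hp
  rw [pv_slice_ii t i y hi0 (by omega), pv_slice_zero l y (by omega)]
  have := congrArg (List.take y.toNat) hp
  simpa [List.take_take, min_eq_left (show y.toNat ≤ x.toNat by omega)] using this

theorem pv_dedup_lenA_eq_lenB (t l : List Char) :
    PySem.List.dedup (pvLenA t l) = pvLenB t l := by
  apply pv_good_eq_of_mem_iff (pv_good_lenA t l) (pv_good_lenB t l)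
  intro z
  rw [PySem.List.mem_dedup]
  exact pv_mem_lenA_iff_lenB t l z

def pvF (l : List Char) (len : Int) : String :=
  String.ofList (l ++ pvTag ++ PySem.List.slice l (some 0) (some len) ++ [')'])

theorem pv_injOn_lenF (t l : List Char) :
    ∀ x ∈ pvLenB t l, ∀ y ∈ pvLenB t l, pvF l x = pvF l y → x = y := by
  intro x hx y hy hf
  have hx' := PySem.List.mem_pyRange_one.mp hx
  have hy' := PySem.List.mem_pyRange_one.mp hy
  have hls := congrArg String.toList hf
  simp only [pvF, String.toList_ofList] at hls
  have h2 : PySem.List.slice l (some 0) (some x) ++ [')'] = PySem.List.slice l (some 0) (some y) ++ [')'] := by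
    have := List.append_cancel_left (List.append_cancel_left (by simpa [List.append_assoc] using hls : l ++ (pvTag ++ (PySem.List.slice l (some 0) (some x) ++ [')'])) = l ++ (pvTag ++ (PySem.List.slice l (some 0) (some y) ++ [')']))))
    exact this
  have h3 := List.append_cancel_right h2
  rw [pv_slice_zero l x (by omega), pv_slice_zero l y (by omega)] at h3
  have hm := pv_lpl_le l t l.length
  have := congrArg List.length h3
  simp only [List.length_take] at this
  omega

def pvBlockA (t l : List Char) (i : Int) : List String :=
  ((PySem.List.pyRange 4 (min ((l.length : Int) + 1) ((t.length : Int) - i + 1)) 1).filter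
      (fun len => decide (PySem.List.slice t (some i) (some (i + len)) = PySem.List.slice l (some 0) (some len)))).map
    (fun len => String.ofList (l ++ pvTag ++ PySem.List.slice t (some i) (some (i + len)) ++ [')']))

theorem pv_innerA (t l : List Char) (i : Int) (acc : List String) :
    (PySem.List.pyRange 4 (min ((l.length : Int) + 1) ((t.length : Int) - i + 1)) 1).foldl
      (fun landmarks length =>
        if PySem.List.slice t (some i) (some (i + length)) = PySem.List.slice l (some 0) (some length)
        then landmarks ++ [String.ofList (l ++ pvTag ++ PySem.List.slice t (some i) (some (i + length)) ++ [')'])]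
        else landmarks) acc
    = acc ++ pvBlockA t l i := by
  have := PySem.List.foldl_append_if
    (fun len => decide (PySem.List.slice t (some i) (some (i + len)) = PySem.List.slice l (some 0) (some len)))
    (fun len => String.ofList (l ++ pvTag ++ PySem.List.slice t (some i) (some (i + len)) ++ [')']))
    (PySem.List.pyRange 4 (min ((l.length : Int) + 1) ((t.length : Int) - i + 1)) 1) acc
  unfold pvBlockA
  simpa [decide_eq_true_eq] using this

def pvSegA (t : List Char) (lm : String) : List String :=
  (if PySem.Chars.isIn lm.toList t then [lm] else [])
    ++ (PySem.List.pyRange 0 ((t.length : Int) - 3) 1).flatMap (pvBlockA t lm.toList)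

theorem pv_bodyA (t : List Char) (acc : List String) (lm : String) :
    (PySem.List.pyRange 0 ((t.length : Int) - 3) 1).foldl (fun landmarks i =>
      (PySem.List.pyRange 4 (min ((lm.toList.length : Int) + 1) ((t.length : Int) - i + 1)) 1).foldl
        (fun landmarks length =>
          if PySem.List.slice t (some i) (some (i + length)) = PySem.List.slice lm.toList (some 0) (some length)
          then landmarks ++ [String.ofList (lm.toList ++ pvTag ++ PySem.List.slice t (some i) (some (i + length)) ++ [')'])]
          else landmarks) landmarks)
      (if PySem.Chars.isIn lm.toList t then acc ++ [lm] else acc)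
    = acc ++ pvSegA t lm := by
  rw [PySem.List.foldl_congr_mem _ _ (fun acc i => acc ++ pvBlockA t lm.toList i) _
    (fun acc i _ => pv_innerA t lm.toList i acc),
    PySem.List.foldl_append_eq_flatMap]
  unfold pvSegA
  by_cases h : PySem.Chars.isIn lm.toList t
  · simp [h]
  · simp [h]

theorem pv_seg_eq (t : List Char) (lm : String) :
    PySem.List.dedup (pvSegA t lm) = PySem.List.dedup (pvSegB t lm) := by
  unfold pvSegA pvSegB
  apply pv_dedup_append_congr
  · -- bare landmark: membership test versus longest-prefix-length comparison
    have := pv_lpl_full_iff lm.toList t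
    by_cases h : PySem.Chars.isIn lm.toList t
    · rw [if_pos h, if_pos (this.mp h)]
    · rw [if_neg h, if_neg (fun he => h (this.mpr he))]
  · -- partial matches
    have h1 : (PySem.List.pyRange 0 ((t.length : Int) - 3) 1).flatMap (pvBlockA t lm.toList)
        = (pvLenA t lm.toList).map (pvF lm.toList) := by
      unfold pvLenA
      rw [List.map_flatMap]
      apply List.flatMap_congr
      intro i hi
      unfold pvBlockA
      apply List.map_congr_left
      intro len hlen
      have h := (List.mem_filter.mp hlen).2
      rw [decide_eq_true_eq] at h
      rw [h, pvF]
    rw [h1, pv_dedup_map_injOn (pvF lm.toList) (pvLenA t lm.toList)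
        (fun x hx y hy => pv_injOn_lenF t lm.toList x ((pv_mem_lenA_iff_lenB t lm.toList x).mp hx) y
          ((pv_mem_lenA_iff_lenB t lm.toList y).mp hy)),
      pv_dedup_lenA_eq_lenB]
    show _ = PySem.List.dedup ((pvLenB t lm.toList).map (pvF lm.toList))
    rw [pv_dedup_map_injOn (pvF lm.toList) (pvLenB t lm.toList) (pv_injOn_lenF t lm.toList),
      pv_dedup_eq_self_of_nodup (pv_good_nodup (pv_good_lenB t lm.toList))]

theorem identify_landmarks_spec' (text : String) :
    identify_landmarks text = identify_landmarks_alt text := by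
  unfold identify_landmarks identify_landmarks_alt
  dsimp only
  rw [PySem.List.foldl_congr_mem _ _ (fun acc lm => acc ++ pvSegA text.toList lm) _
      (fun acc lm _ => pv_bodyA text.toList acc lm),
    PySem.List.foldl_append_eq_flatMap, List.nil_append]
  exact pv_dedup_flatMap_congr _ _ _ (fun lm _ => pv_seg_eq text.toList lm)

-- ===== VERDICT (by name: the statement is the Claim_ definition above) =====
theorem identify_landmarks_spec : Claim_equal_identify_landmarks := by
  intro text _
  exact identify_landmarks_spec' text
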